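-- pv_equiv track=rewrite | github.com/johnmaruska/advent-of-code-2021 | 08.py | solve_guaranteed
-- ===== SOURCE A (Python) =====
-- DIGIT_SEGMENTS = {
--     0: 'abcefg',
--     1: 'cf',
--     2: 'acdeg',
--     3: 'acdfg',
--     4: 'bcdf',
--     5: 'abdfg',
--     6: 'abdefg',
--     7: 'acf',
--     8: 'abcdefg',
--     9: 'abcdfg'
-- }
--
-- def solve_guaranteed(uniq_displays):
--     solved_displays = {}
--     for display in uniq_displays:
--         matches = [[digit, segments] for digit, segments in DIGIT_SEGMENTS.items()
--                    if len(segments) == len(display)]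
--         if len(matches) == 1:
--             digit, segments = matches[0]
--             solved_displays[digit] = display
--     return solved_displays
-- ===== SOURCE B (Python) =====
-- DIGIT_SEGMENTS = {
--     0: 'abcefg',
--     1: 'cf',
--     2: 'acdeg',
--     3: 'acdfg',
--     4: 'bcdf',
--     5: 'abdfg',
--     6: 'abdefg',
--     7: 'acf',
--     8: 'abcdefg',
--     9: 'abcdfg'
-- }
--
-- def _build_len_index():
--     counts = {}
--     for segments in DIGIT_SEGMENTS.values():
--         counts[len(segments)] = counts.get(len(segments), 0) + 1
--     index = {}
--     for digit, segments in DIGIT_SEGMENTS.items():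
--         if counts[len(segments)] == 1:
--             index[len(segments)] = digit
--     return index
--
-- LEN_TO_DIGIT = _build_len_index()
--
-- def solve_guaranteed(uniq_displays):
--     solved_displays = {}
--     for display in uniq_displays:
--         digit = LEN_TO_DIGIT.get(len(display))
--         if digit is not None:
--             solved_displays[digit] = display
--     return solved_displays
-- ===== Notes on version B (the rewrite author's own statement) =====
-- stated objective: simpler
-- what changed: B precomputes once a length-to-digit index (segment lengths occurring exactly once in DIGIT_SEGMENTS), so each display is handled by a single dict lookup instead of A's per-display scan-and-filter over all ten digit patterns.
import Mathlib
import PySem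

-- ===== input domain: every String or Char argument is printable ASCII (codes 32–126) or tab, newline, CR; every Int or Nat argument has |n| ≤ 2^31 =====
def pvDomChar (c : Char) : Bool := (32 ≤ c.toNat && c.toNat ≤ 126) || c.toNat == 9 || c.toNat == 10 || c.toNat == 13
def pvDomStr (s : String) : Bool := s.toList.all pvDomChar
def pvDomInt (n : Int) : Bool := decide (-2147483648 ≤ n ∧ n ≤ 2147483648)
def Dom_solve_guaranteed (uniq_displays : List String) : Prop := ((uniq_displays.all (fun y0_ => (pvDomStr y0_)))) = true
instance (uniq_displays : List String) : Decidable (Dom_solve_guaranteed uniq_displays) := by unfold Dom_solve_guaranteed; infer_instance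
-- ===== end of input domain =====

-- B replaces A's per-display scan over DIGIT_SEGMENTS by a precomputed length→digit
-- index (lengths occurring exactly once), turning each step into a single lookup (objective: simpler).

-- ===== PORT A =====
def DIGIT_SEGMENTS : PySem.Dict Int String :=
  PySem.Dict.ofList [(0, "abcefg"), (1, "cf"), (2, "acdeg"), (3, "acdfg"), (4, "bcdf"),
    (5, "abdfg"), (6, "abdefg"), (7, "acf"), (8, "abcdefg"), (9, "abcdfg")]

def solve_guaranteed (uniq_displays : List String) : List (Int × String) :=
  (uniq_displays.foldl (fun solved_displays display =>
      let matchs := DIGIT_SEGMENTS.items.filter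
        (fun p => PySem.Str.len p.2 == PySem.Str.len display)
      if matchs.length == 1 then
        match matchs with
        | (digit, _segments) :: _ => solved_displays.insert digit display
        | [] => solved_displays
      else solved_displays)
    PySem.Dict.empty).items

-- ===== PORT B =====
-- counts[len(segments)] is read with default 0; every key read is present, so this is exact here.
def LEN_TO_DIGIT : PySem.Dict Int Int :=
  let counts : PySem.Dict Int Int :=
    DIGIT_SEGMENTS.values.foldl
      (fun d segments => d.insert (PySem.Str.len segments) (d.getD (PySem.Str.len segments) 0 + 1))
      PySem.Dict.empty
  DIGIT_SEGMENTS.items.foldl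
    (fun index p =>
      if counts.getD (PySem.Str.len p.2) 0 == 1 then index.insert (PySem.Str.len p.2) p.1
      else index)
    PySem.Dict.empty

def solve_guaranteed_alt (uniq_displays : List String) : List (Int × String) :=
  (uniq_displays.foldl (fun solved_displays display =>
      match LEN_TO_DIGIT.get? (PySem.Str.len display) with
      | some digit => solved_displays.insert digit display
      | none => solved_displays)
    PySem.Dict.empty).items

-- ===== PRECONDITION & SPEC =====
def Spec_solve_guaranteed (uniq_displays : List String) (out : List (Int × String)) : Prop := out = solve_guaranteed_alt uniq_displays
instance (uniq_displays : List String) (out : List (Int × String)) : Decidable (Spec_solve_guaranteed uniq_displays out) := by unfold Spec_solve_guaranteed; infer_instance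

-- ===== CLAIM (what is proved, stated in full; the proofs are below) =====
def Claim_equal_solve_guaranteed : Prop := ∀ (uniq_displays : List String), Dom_solve_guaranteed uniq_displays → Spec_solve_guaranteed uniq_displays (solve_guaranteed uniq_displays)

-- ===== LEMMAS AND PROOFS =====

theorem len_to_digit_eval :
    LEN_TO_DIGIT = PySem.Dict.mk [(2, 1), (4, 4), (3, 7), (7, 8)] := by decide

theorem digit_segments_items_eval :
    DIGIT_SEGMENTS.items = [(0, "abcefg"), (1, "cf"), (2, "acdeg"), (3, "acdfg"), (4, "bcdf"),
      (5, "abdfg"), (6, "abdefg"), (7, "acf"), (8, "abcdefg"), (9, "abcdfg")] := by decide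

theorem step_eq (solved : PySem.Dict Int String) (display : String) :
    (let matchs := DIGIT_SEGMENTS.items.filter
        (fun p => PySem.Str.len p.2 == PySem.Str.len display)
      if matchs.length == 1 then
        match matchs with
        | (digit, _segments) :: _ => solved.insert digit display
        | [] => solved
      else solved) =
    (match LEN_TO_DIGIT.get? (PySem.Str.len display) with
      | some digit => solved.insert digit display
      | none => solved) := by
  simp only [len_to_digit_eval, digit_segments_items_eval]
  by_cases h2 : PySem.Str.len display = 2
  · have g : ((display.length : Int)) = 2 := by simpa [PySem.Str.len_eq] using h2
    simp [List.filter, PySem.Str.len_eq, PySem.Dict.get?, g]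
  by_cases h3 : PySem.Str.len display = 3
  · have g : ((display.length : Int)) = 3 := by simpa [PySem.Str.len_eq] using h3
    simp [List.filter, PySem.Str.len_eq, PySem.Dict.get?, g]
  by_cases h4 : PySem.Str.len display = 4
  · have g : ((display.length : Int)) = 4 := by simpa [PySem.Str.len_eq] using h4
    simp [List.filter, PySem.Str.len_eq, PySem.Dict.get?, g]
  by_cases h5 : PySem.Str.len display = 5
  · have g : ((display.length : Int)) = 5 := by simpa [PySem.Str.len_eq] using h5
    simp [List.filter, PySem.Str.len_eq, PySem.Dict.get?, g]
  by_cases h6 : PySem.Str.len display = 6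
  · have g : ((display.length : Int)) = 6 := by simpa [PySem.Str.len_eq] using h6
    simp [List.filter, PySem.Str.len_eq, PySem.Dict.get?, g]
  by_cases h7 : PySem.Str.len display = 7
  · have g : ((display.length : Int)) = 7 := by simpa [PySem.Str.len_eq] using h7
    simp [List.filter, PySem.Str.len_eq, PySem.Dict.get?, g]
  -- no segment length matches: the filter is empty and the lookup misses
  have g2 : ((display.length : Int)) ≠ 2 := by simpa [PySem.Str.len_eq] using h2
  have g3 : ((display.length : Int)) ≠ 3 := by simpa [PySem.Str.len_eq] using h3
  have g4 : ((display.length : Int)) ≠ 4 := by simpa [PySem.Str.len_eq] using h4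
  have g5 : ((display.length : Int)) ≠ 5 := by simpa [PySem.Str.len_eq] using h5
  have g6 : ((display.length : Int)) ≠ 6 := by simpa [PySem.Str.len_eq] using h6
  have g7 : ((display.length : Int)) ≠ 7 := by simpa [PySem.Str.len_eq] using h7
  have e2 : (((2 : Int)) == ((display.length : Int))) = false := by simp [Ne.symm g2]
  have e3 : (((3 : Int)) == ((display.length : Int))) = false := by simp [Ne.symm g3]
  have e4 : (((4 : Int)) == ((display.length : Int))) = false := by simp [Ne.symm g4]
  have e5 : (((5 : Int)) == ((display.length : Int))) = false := by simp [Ne.symm g5]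
  have e6 : (((6 : Int)) == ((display.length : Int))) = false := by simp [Ne.symm g6]
  have e7 : (((7 : Int)) == ((display.length : Int))) = false := by simp [Ne.symm g7]
  simp [List.filter, PySem.Str.len_eq, PySem.Dict.get?, e2, e3, e4, e5, e6, e7]

-- ===== VERDICT (by name: the statement is the Claim_ definition above) =====
theorem solve_guaranteed_spec : Claim_equal_solve_guaranteed := by
  intro uniq_displays _
  unfold Spec_solve_guaranteed solve_guaranteed solve_guaranteed_alt
  congr 1
  apply PySem.List.foldl_congr_mem
  intro solved display _
  exact step_eq solved display
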